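-- pv_equiv track=rewrite | github.com/chuanyao17/CodingPractice | even number/evenNumber.py | evenSubarray
-- ===== SOURCE A (Python) =====
-- def evenSubarray(arr, k):
--     res=set()
--     left,right,odd_num=0,0,0
--     def sub_lists (l):
--
--         for i in range(len(l) + 1):
--             for j in range(i):
--                 res.add(''.join(map(str,l[j:i])))
--     while right< len(arr):
--         if arr[right]%2==1:
--             odd_num+=1
--         while odd_num>k and left<right:
--             if arr[left]%2==1:
--                 odd_num-=1
--             left+=1
--         sub_lists(arr[left:right+1])
--         right+=1
--     return res
-- ===== SOURCE B (Python) =====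
-- def evenSubarray(arr, k):
--     # Sliding window: keep [left..right] holding at most k odd numbers and
--     # emit each qualifying subarray exactly once, at its right endpoint.
--     res = set()
--     left = odd = 0
--     for right, x in enumerate(arr):
--         odd += x % 2
--         while left <= right and odd > k:
--             odd -= arr[left] % 2
--             left += 1
--         for j in range(left, right + 1):
--             res.add(''.join(map(str, arr[j:right + 1])))
--     return res
-- ===== Notes on version B (the rewrite author's own statement) =====
-- stated objective: faster
-- what changed: B replaces A's per-step re-enumeration of every subarray of the whole window (sub_lists on arr[left:right+1] at each right) by a single sliding-window pass that emits each qualifying subarray exactly once, at its right endpoint.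
-- intended difference: On inputs where some single element already has more than k odd entries (some x in arr with x % 2 > k, i.e. k < 0, or k = 0 with an odd element), A's 'left < right' guard still emits that lone element's string although it exceeds the limit, while B emits only subarrays with at most k odds; B's value is the intended one for 'at most k odd numbers'. — e.g. on evenSubarray([1], 0): A returns ["1"], B returns []
import Mathlib
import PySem

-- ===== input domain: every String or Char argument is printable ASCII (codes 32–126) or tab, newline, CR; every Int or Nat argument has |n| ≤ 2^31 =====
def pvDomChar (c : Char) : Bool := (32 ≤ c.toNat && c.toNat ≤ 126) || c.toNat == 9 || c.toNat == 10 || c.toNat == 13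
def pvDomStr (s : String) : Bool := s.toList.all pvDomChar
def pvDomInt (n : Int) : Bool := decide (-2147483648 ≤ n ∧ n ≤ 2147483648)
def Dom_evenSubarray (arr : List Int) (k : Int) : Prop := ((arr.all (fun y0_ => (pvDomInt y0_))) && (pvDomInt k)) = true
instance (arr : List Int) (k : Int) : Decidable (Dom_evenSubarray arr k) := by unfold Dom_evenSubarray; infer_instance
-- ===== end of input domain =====

-- B replaces A's per-step re-enumeration of all subarrays of the window by a
-- sliding window that emits each qualifying subarray once, at its right endpoint
-- (objective: faster).

-- ===== PORT A =====
-- ''.join(map(str, l))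
def pvJoin (l : List Int) : String := PySem.Str.join "" (l.map PySem.Int.toStr)

-- sub_lists: for i in range(len(l)+1): for j in range(i): res.add(''.join(map(str, l[j:i])))
def pvSubLists (l : List Int) (res : PySem.Set String) : PySem.Set String :=
  (PySem.List.pyRange 0 ((l.length : Int) + 1) 1).foldl (fun res i =>
    (PySem.List.pyRange 0 i 1).foldl (fun res j =>
      PySem.Set.add res (pvJoin (PySem.List.slice l (some j) (some i)))) res) res

-- while odd_num > k and left < right: …   (fuel = right - left bounds the iteration count)
def pvShrink (arr : List Int) (k right : Int) : Nat → Int → Int → Int × Int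
  | 0, left, odd => (left, odd)
  | fuel+1, left, odd =>
    if odd > k ∧ left < right then
      pvShrink arr k right fuel (left + 1)
        (if PySem.Int.mod (PySem.List.pyGetD arr left 0) 2 = 1 then odd - 1 else odd)
    else (left, odd)

-- while right < len(arr): …   (fuel = len(arr) bounds the iteration count)
def pvLoopA (arr : List Int) (k : Int) : Nat → Int → Int → Int → PySem.Set String → PySem.Set String
  | 0, _, _, _, res => res
  | fuel+1, left, right, odd, res =>
    if right < (arr.length : Int) then
      let odd1 := if PySem.Int.mod (PySem.List.pyGetD arr right 0) 2 = 1 then odd + 1 else odd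
      let lo := pvShrink arr k right (right - left).toNat left odd1
      let res' := pvSubLists (PySem.List.slice arr (some lo.1) (some (right + 1))) res
      pvLoopA arr k fuel lo.1 (right + 1) lo.2 res'
    else res

def evenSubarray (arr : List Int) (k : Int) : List String :=
  pvLoopA arr k arr.length 0 0 0 PySem.Set.empty

-- ===== PORT B =====
-- while left <= right and odd > k: odd -= arr[left] % 2; left += 1
-- (fuel = right + 1 - left bounds the iteration count)
def pvShrinkB (arr : List Int) (k right : Int) : Nat → Int → Int → Int × Int
  | 0, left, odd => (left, odd)
  | fuel+1, left, odd =>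
    if left ≤ right ∧ odd > k then
      pvShrinkB arr k right fuel (left + 1)
        (odd - PySem.Int.mod (PySem.List.pyGetD arr left 0) 2)
    else (left, odd)

-- for right, x in enumerate(arr): …  with the mutable state (left, odd, res)
def evenSubarray_alt (arr : List Int) (k : Int) : List String :=
  ((PySem.List.enumerate arr 0).foldl (fun st rx =>
    let right := rx.1
    let odd1 := st.2.1 + PySem.Int.mod rx.2 2
    let lo := pvShrinkB arr k right (right + 1 - st.1).toNat st.1 odd1
    let res' := (PySem.List.pyRange lo.1 (right + 1) 1).foldl (fun res j =>
      PySem.Set.add res (pvJoin (PySem.List.slice arr (some j) (some (right + 1))))) st.2.2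
    (lo.1, lo.2, res')) ((0 : Int), (0 : Int), PySem.Set.empty)).2.2

-- ===== PRECONDITION & SPEC =====
-- On inputs where some single element alone has more than k odd entries (some x in arr
-- with x % 2 > k), A's 'left < right' guard still emits that lone element's string although
-- it exceeds the limit; B emits only subarrays with at most k odd elements, the intended set.
def D_evenSubarray (arr : List Int) (k : Int) : Prop := ∃ x ∈ arr, PySem.Int.mod x 2 > k
instance (arr : List Int) (k : Int) : Decidable (D_evenSubarray arr k) := by unfold D_evenSubarray; infer_instance

def Spec_evenSubarray (arr : List Int) (k : Int) (out : List String) : Prop := ¬ D_evenSubarray arr k → out = evenSubarray_alt arr k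
instance (arr : List Int) (k : Int) (out : List String) : Decidable (Spec_evenSubarray arr k out) := by unfold Spec_evenSubarray; infer_instance

def pvDiffWitness_evenSubarray : List Int × Int := ([1], 0)
def pvDiffWitnessOut_evenSubarray : (List String) × (List String) := (["1"], [])

-- ===== CLAIM (what is proved, stated in full; the proofs are below) =====
def Claim_unchanged_evenSubarray : Prop := ∀ (arr : List Int) (k : Int), Dom_evenSubarray arr k → Spec_evenSubarray arr k (evenSubarray arr k)
def Claim_changed_evenSubarray : Prop := Dom_evenSubarray (pvDiffWitness_evenSubarray.1) (pvDiffWitness_evenSubarray.2) ∧ D_evenSubarray (pvDiffWitness_evenSubarray.1) (pvDiffWitness_evenSubarray.2) ∧ evenSubarray (pvDiffWitness_evenSubarray.1) (pvDiffWitness_evenSubarray.2) = pvDiffWitnessOut_evenSubarray.1 ∧ evenSubarray_alt (pvDiffWitness_evenSubarray.1) (pvDiffWitness_evenSubarray.2) = pvDiffWitnessOut_evenSubarray.2 ∧ pvDiffWitnessOut_evenSubarray.1 ≠ pvDiffWitnessOut_evenSubarray.2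

-- ===== LEMMAS AND PROOFS =====

-- weight of one element: x % 2, which is 0 or 1
def pvW (x : Int) : Int := PySem.Int.mod x 2

-- number of odd elements among the first i
def pvP (arr : List Int) (i : Nat) : Int := ((arr.map pvW).take i).sum

-- minimal window start for right end r (= r itself when arr[r] alone exceeds k)
def pvM (arr : List Int) (k : Int) (r : Nat) : Nat :=
  Nat.find (p := fun j => pvP arr (r + 1) - pvP arr j ≤ k ∨ j = r) ⟨r, Or.inr rfl⟩

-- the concatenation str(arr[j]) + … + str(arr[r]), as code points and as a string
def pvCS (arr : List Int) (j r : Nat) : List Char :=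
  (((arr.drop j).take (r + 1 - j)).map PySem.Int.toChars).flatten
def pvS (arr : List Int) (j r : Nat) : String := String.ofList (pvCS arr j r)

-- one step: add the subarray strings ending at r, starts ascending from pvM
def pvEmit (arr : List Int) (k : Int) (r : Nat) (s : PySem.Set String) : PySem.Set String :=
  (List.range (r + 1 - pvM arr k r)).foldl
    (fun s d => PySem.Set.add s (pvS arr (pvM arr k r + d) r)) s

-- the common canonical form of both ports
def pvCanon (arr : List Int) (k : Int) : List String :=
  (List.range arr.length).foldl (fun s r => pvEmit arr k r s) []

theorem pvW_nonneg (x : Int) : 0 ≤ pvW x := PySem.Int.mod_nonneg x (by norm_num)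
theorem pvW_le_one (x : Int) : pvW x ≤ 1 := by
  have := PySem.Int.mod_lt x (b := 2) (by norm_num); unfold pvW; omega

theorem pvP_succ (arr : List Int) (j : Nat) (hj : j < arr.length) :
    pvP arr (j + 1) = pvP arr j + pvW arr[j] := by
  unfold pvP
  rw [List.sum_take_succ _ j (by simpa using hj)]
  simp

theorem pvP_mono (arr : List Int) {i j : Nat} (h : i ≤ j) : pvP arr i ≤ pvP arr j := by
  induction j, h using Nat.le_induction with
  | base => exact le_refl _
  | succ n hn ih =>
    by_cases hlt : n < arr.length
    · have h1 := pvW_nonneg arr[n]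
      have h2 := pvP_succ arr n hlt
      omega
    · have : pvP arr (n + 1) = pvP arr n := by
        unfold pvP
        rw [List.take_of_length_le (by simpa using by omega),
            List.take_of_length_le (by simpa using by omega)]
      omega

-- basic facts about pvM
theorem pvM_le (arr : List Int) (k : Int) (r : Nat) : pvM arr k r ≤ r :=
  Nat.find_le (Or.inr rfl)

theorem pvM_spec (arr : List Int) (k : Int) (r : Nat) :
    pvP arr (r + 1) - pvP arr (pvM arr k r) ≤ k ∨ pvM arr k r = r :=
  Nat.find_spec (p := fun j => pvP arr (r + 1) - pvP arr j ≤ k ∨ j = r) ⟨r, Or.inr rfl⟩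

theorem pvM_min (arr : List Int) (k : Int) (r : Nat) {j : Nat}
    (h : pvP arr (r + 1) - pvP arr j ≤ k ∨ j = r) : pvM arr k r ≤ j :=
  Nat.find_min' _ h

theorem pvM_mono (arr : List Int) (k : Int) {e r : Nat} (h : e ≤ r) :
    pvM arr k e ≤ pvM arr k r := by
  by_cases h1 : e ≤ pvM arr k r
  · exact le_trans (pvM_le arr k e) h1
  · rcases pvM_spec arr k r with hs | hs
    · apply pvM_min; left
      have := pvP_mono arr (show e + 1 ≤ r + 1 by omega)
      omega
    · omega

-- ''.join(map(str, l)) is the flattened code points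
theorem pvJoinNil (ps : List (List Char)) : PySem.Chars.join [] ps = ps.flatten := by
  induction ps with
  | nil => simp [PySem.Chars.join_nil]
  | cons p rest ih =>
    cases rest with
    | nil => simp [PySem.Chars.join_singleton]
    | cons q rs =>
      rw [PySem.Chars.join_cons_cons]
      simp_all

theorem pvJoin_eq (l : List Int) :
    pvJoin l = String.ofList ((l.map PySem.Int.toChars).flatten) := by
  apply String.toList_inj.mp
  rw [String.toList_ofList]
  unfold pvJoin
  rw [PySem.Str.toList_join]
  simp [pvJoinNil, List.map_map, Function.comp_def, PySem.Int.toList_toStr]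

-- a fold every step of which fixes the initial state is the identity
theorem pvFoldlFix {α β : Type} (f : α → β → α) (l : List β) (s : α)
    (h : ∀ x ∈ l, f s x = s) : l.foldl f s = s := by
  induction l with
  | nil => rfl
  | cons x xs ih =>
    rw [List.foldl_cons, h x (by simp)]
    exact ih (fun y hy => h y (by simp [hy]))

-- a fold of adds whose every element is already present is the identity
theorem pvFoldlAddId {α β : Type} [BEq α] [LawfulBEq α] (l : List β) (f : β → α)
    (s : PySem.Set α) (h : ∀ x ∈ l, f x ∈ s) :
    l.foldl (fun s b => PySem.Set.add s (f b)) s = s :=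
  pvFoldlFix _ _ _ (fun x hx => PySem.Set.add_of_mem (h x hx))

-- membership is preserved along an add-fold
theorem pvMemFoldlAdd {α β : Type} [BEq α] [LawfulBEq α] (l : List β) (f : β → α)
    (s : PySem.Set α) {y : α} (h : y ∈ s) :
    y ∈ l.foldl (fun s b => PySem.Set.add s (f b)) s :=
  (PySem.Set.mem_foldl_add l f s y).mpr (Or.inl h)

def pvInv (arr : List Int) (k : Int) (r : Nat) (s : PySem.Set String) : Prop :=
  ∀ e j : Nat, e < r → pvM arr k e ≤ j → j ≤ e → pvS arr j e ∈ s

-- the string a window slice contributes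
theorem pvJoinSlice (arr : List Int) {M i j r : Nat} (_hr : r < arr.length) (hM : M ≤ r)
    (hj : j < i) (hi : i ≤ r + 1 - M) :
    pvJoin (PySem.List.slice ((arr.drop M).take (r + 1 - M)) (some (j : Int)) (some (i : Int)))
      = pvS arr (M + j) (M + i - 1) := by
  rw [PySem.List.slice_natCast, pvJoin_eq]
  unfold pvS pvCS
  have hlist : List.take (i - j) (List.drop j ((arr.drop M).take (r + 1 - M)))
      = List.take (M + i - 1 + 1 - (M + j)) (List.drop (M + j) arr) := by
    rw [List.drop_take, List.drop_drop, List.take_take]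
    congr 1
    omega
  rw [hlist]

theorem pvSubLists_collapse (arr : List Int) (k : Int) (r : Nat) (hr : r < arr.length)
    (s : PySem.Set String) (hInv : pvInv arr k r s) :
    pvSubLists (PySem.List.slice arr (some ((pvM arr k r : Nat) : Int)) (some ((r : Int) + 1))) s
      = pvEmit arr k r s := by
  have hM : pvM arr k r ≤ r := pvM_le arr k r
  rw [show ((r : Int) + 1) = (((r + 1 : Nat)) : Int) by push_cast; ring,
      PySem.List.slice_natCast]
  unfold pvSubLists
  have hwlen : ((arr.drop (pvM arr k r)).take (r + 1 - pvM arr k r)).length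
      = r + 1 - pvM arr k r := by
    simp
    omega
  rw [hwlen]
  rw [show ((r + 1 - pvM arr k r : Nat) : Int) + 1 = (((r + 1 - pvM arr k r) + 1 : Nat) : Int)
        by push_cast; ring,
      PySem.List.pyRange_zero_natCast, List.foldl_map, List.range_succ, List.foldl_append]
  -- the inner fold, with its bound a natural number
  have hinner : ∀ (t : PySem.Set String) (i : Nat),
      List.foldl (fun res j => PySem.Set.add res
          (pvJoin (PySem.List.slice ((arr.drop (pvM arr k r)).take (r + 1 - pvM arr k r))
            (some j) (some (i : Int))))) t (PySem.List.pyRange 0 (i : Int))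
      = List.foldl (fun res (j : Nat) => PySem.Set.add res
          (pvJoin (PySem.List.slice ((arr.drop (pvM arr k r)).take (r + 1 - pvM arr k r))
            (some ((j : Nat) : Int)) (some (i : Int))))) t (List.range i) := by
    intro t i
    rw [PySem.List.pyRange_zero_natCast, List.foldl_map]
  -- the first r + 1 - pvM iterations add nothing new
  have hfix : List.foldl (fun (x : PySem.Set String) (y : Nat) =>
      List.foldl (fun res j => PySem.Set.add res
          (pvJoin (PySem.List.slice ((arr.drop (pvM arr k r)).take (r + 1 - pvM arr k r))
            (some j) (some ((y : Nat) : Int))))) x (PySem.List.pyRange 0 ((y : Nat) : Int)))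
      s (List.range (r + 1 - pvM arr k r)) = s := by
    apply pvFoldlFix
    intro i hi
    rw [List.mem_range] at hi
    rw [hinner]
    apply pvFoldlAddId
    intro j hj
    rw [List.mem_range] at hj
    rw [pvJoinSlice arr hr hM hj (by omega)]
    refine hInv (pvM arr k r + i - 1) (pvM arr k r + j) (by omega) ?_ (by omega)
    exact le_trans (pvM_mono arr k (show pvM arr k r + i - 1 ≤ r by omega))
      (Nat.le_add_right _ _)
  rw [hfix]
  simp only [List.foldl_cons, List.foldl_nil]
  rw [hinner]
  unfold pvEmit
  apply PySem.List.foldl_congr_mem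
  intro acc j hj
  rw [List.mem_range] at hj
  rw [pvJoinSlice arr hr hM hj (le_refl _),
    show pvM arr k r + (r + 1 - pvM arr k r) - 1 = r by omega]

theorem pvShrink_spec (arr : List Int) (k : Int) (r : Nat) (hr : r < arr.length) :
    ∀ (fuel left : Nat), left ≤ r → left ≤ pvM arr k r → r - left ≤ fuel →
    pvShrink arr k (r : Int) fuel (left : Int) (pvP arr (r + 1) - pvP arr left)
      = (((pvM arr k r : Nat) : Int), pvP arr (r + 1) - pvP arr (pvM arr k r)) := by
  intro fuel
  induction fuel with
  | zero =>
    intro left h1 h2 h3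
    have hlr : left = r := by omega
    have hM : pvM arr k r = left := le_antisymm (hlr ▸ pvM_le arr k r) h2
    rw [hM]
    rfl
  | succ fuel ih =>
    intro left h1 h2 h3
    simp only [pvShrink]
    by_cases hQ : pvP arr (r + 1) - pvP arr left ≤ k
    · have hM : pvM arr k r = left := le_antisymm (pvM_min arr k r (Or.inl hQ)) h2
      rw [if_neg (by omega), hM]
    · by_cases hlr : left = r
      · have hM : pvM arr k r = left := le_antisymm (hlr ▸ pvM_le arr k r) h2
        rw [if_neg (by simp [hlr]), hM]
      · have hlt : left < r := lt_of_le_of_ne h1 hlr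
        rw [if_pos ⟨by omega, by exact_mod_cast hlt⟩]
        have hgl : PySem.List.pyGetD arr (left : Int) 0 = arr[left]'(by omega) := by
          rw [PySem.List.pyGetD_natCast, List.getD_eq_getElem _ _ (by omega)]
        have hw01 : pvW (arr[left]'(by omega)) = 0 ∨ pvW (arr[left]'(by omega)) = 1 := by
          have h0 := pvW_nonneg (arr[left]'(by omega))
          have hle := pvW_le_one (arr[left]'(by omega))
          omega
        have hsucc := pvP_succ arr left (by omega)
        have hlm : left < pvM arr k r := by
          rcases Nat.lt_or_ge left (pvM arr k r) with hx | hx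
          · exact hx
          · exfalso
            have : pvM arr k r = left := le_antisymm hx h2
            rcases pvM_spec arr k r with hs | hs
            · rw [this] at hs; exact hQ hs
            · omega
        have hstep : (if PySem.Int.mod (PySem.List.pyGetD arr (left : Int) 0) 2 = 1
              then pvP arr (r + 1) - pvP arr left - 1
              else pvP arr (r + 1) - pvP arr left)
            = pvP arr (r + 1) - pvP arr (left + 1) := by
          rw [hgl]
          show (if pvW (arr[left]'(by omega)) = 1 then _ else _) = _
          rcases hw01 with hw | hw <;> rw [hw] <;> simp <;> omega
        rw [hstep, show ((left : Int) + 1) = (((left + 1 : Nat)) : Int) by push_cast; ring]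
        exact ih (left + 1) (by omega) (by omega) (by omega)

theorem pvLoopA_spec (arr : List Int) (k : Int) :
    ∀ (fuel : Nat), ∀ (r left : Nat) (s : PySem.Set String),
      arr.length - r ≤ fuel → r ≤ arr.length → left ≤ r →
      (r < arr.length → left ≤ pvM arr k r) →
      pvInv arr k r s →
      pvLoopA arr k fuel (left : Int) (r : Int) (pvP arr r - pvP arr left) s
        = (List.range' r (arr.length - r)).foldl (fun s r => pvEmit arr k r s) s := by
  intro fuel
  induction fuel with
  | zero =>
    intro r left s h1 h2 h3 h4 h5
    have : arr.length - r = 0 := by omega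
    rw [this]
    rfl
  | succ fuel ih =>
    intro r left s h1 h2 h3 h4 h5
    by_cases hrn : r < arr.length
    · simp only [pvLoopA]
      rw [if_pos (by exact_mod_cast hrn)]
      have hgl : PySem.List.pyGetD arr (r : Int) 0 = arr[r] := by
        rw [PySem.List.pyGetD_natCast, List.getD_eq_getElem _ _ hrn]
      have hw01 : pvW arr[r] = 0 ∨ pvW arr[r] = 1 := by
        have h0 := pvW_nonneg arr[r]
        have hle := pvW_le_one arr[r]
        omega
      have hsucc := pvP_succ arr r hrn
      have hstep : (if PySem.Int.mod (PySem.List.pyGetD arr (r : Int) 0) 2 = 1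
            then pvP arr r - pvP arr left + 1
            else pvP arr r - pvP arr left)
          = pvP arr (r + 1) - pvP arr left := by
        rw [hgl]
        show (if pvW arr[r] = 1 then _ else _) = _
        rcases hw01 with hw | hw <;> rw [hw] <;> simp <;> omega
      rw [hstep]
      have htn : ((r : Int) - (left : Int)).toNat = r - left := by omega
      rw [htn, pvShrink_spec arr k r hrn (r - left) left h3 (h4 hrn) (le_refl _)]
      dsimp only
      rw [pvSubLists_collapse arr k r hrn s h5]
      have hInv' : pvInv arr k (r + 1) (pvEmit arr k r s) := by
        intro e j he hj1 hj2
        rcases Nat.lt_or_ge e r with he' | he'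
        · unfold pvEmit
          exact pvMemFoldlAdd _ _ _ (h5 e j he' hj1 hj2)
        · have her : e = r := by omega
          subst her
          unfold pvEmit
          apply (PySem.Set.mem_foldl_add _ _ _ _).mpr
          right
          refine ⟨j - pvM arr k e, by rw [List.mem_range]; omega, ?_⟩
          rw [show pvM arr k e + (j - pvM arr k e) = j by omega]
      have hih := ih (r + 1) (pvM arr k r) (pvEmit arr k r s) (by omega) (by omega)
        (by have := pvM_le arr k r; omega)
        (fun h => pvM_mono arr k (Nat.le_succ r)) hInv'
      rw [show ((r : Int) + 1) = (((r + 1 : Nat)) : Int) by push_cast; ring]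
      rw [hih]
      have hnr : arr.length - r = (arr.length - (r + 1)) + 1 := by omega
      rw [hnr, List.range'_succ, List.foldl_cons]
    · simp only [pvLoopA]
      rw [if_neg (by exact_mod_cast hrn)]
      have : arr.length - r = 0 := by omega
      rw [this]
      rfl

theorem pvA_canon (arr : List Int) (k : Int) : evenSubarray arr k = pvCanon arr k := by
  unfold evenSubarray pvCanon
  have h0 : pvP arr 0 - pvP arr 0 = 0 := by omega
  have := pvLoopA_spec arr k arr.length 0 0 [] (by omega) (by omega) (by omega)
    (fun _ => Nat.zero_le _) (fun e j he _ _ => absurd he (Nat.not_lt_zero e))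
  rw [h0] at this
  simpa [List.range_eq_range', PySem.Set.empty] using this

-- ===== B-side lemmas (all under hk : every single element has weight ≤ k, i.e. ¬ D_) =====

-- under hk the minimal window start always qualifies
theorem pvM_qual (arr : List Int) (k : Int) (r : Nat) (hr : r < arr.length)
    (hk : ∀ x ∈ arr, pvW x ≤ k) :
    pvP arr (r + 1) - pvP arr (pvM arr k r) ≤ k := by
  rcases pvM_spec arr k r with hs | hs
  · exact hs
  · rw [hs, pvP_succ arr r hr]
    have := hk arr[r] (List.getElem_mem hr)
    omega

theorem pvShrinkB_spec (arr : List Int) (k : Int) (r : Nat) (hr : r < arr.length)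
    (hk : ∀ x ∈ arr, pvW x ≤ k) :
    ∀ (fuel left : Nat), left ≤ pvM arr k r → pvM arr k r - left ≤ fuel →
    pvShrinkB arr k (r : Int) fuel (left : Int) (pvP arr (r + 1) - pvP arr left)
      = (((pvM arr k r : Nat) : Int), pvP arr (r + 1) - pvP arr (pvM arr k r)) := by
  intro fuel
  induction fuel with
  | zero =>
    intro left h1 h2
    have hM : pvM arr k r = left := by omega
    rw [hM]
    rfl
  | succ fuel ih =>
    intro left h1 h2
    simp only [pvShrinkB]
    by_cases hQ : pvP arr (r + 1) - pvP arr left ≤ k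
    · have hM : pvM arr k r = left := le_antisymm (pvM_min arr k r (Or.inl hQ)) h1
      rw [if_neg (by omega), hM]
    · have hlm : left < pvM arr k r := lt_of_le_of_ne h1 (fun h => hQ (h ▸ pvM_qual arr k r hr hk))
      have hltr : left < r + 1 := by have := pvM_le arr k r; omega
      rw [if_pos ⟨by exact_mod_cast Nat.lt_succ_iff.mp hltr, by omega⟩]
      have hgl : PySem.List.pyGetD arr (left : Int) 0 = arr[left]'(by omega) := by
        rw [PySem.List.pyGetD_natCast, List.getD_eq_getElem _ _ (by omega)]
      have hsucc := pvP_succ arr left (by omega)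
      have hstep : pvP arr (r + 1) - pvP arr left - PySem.Int.mod (PySem.List.pyGetD arr (left : Int) 0) 2
          = pvP arr (r + 1) - pvP arr (left + 1) := by
        rw [hgl]
        show _ - pvW (arr[left]'(by omega)) = _
        omega
      rw [hstep, show ((left : Int) + 1) = (((left + 1 : Nat)) : Int) by push_cast; ring]
      exact ih (left + 1) (by omega) (by omega)

-- B's emission at step r is exactly pvEmit
theorem pvEmitB (arr : List Int) (k : Int) (r : Nat) (res : PySem.Set String) :
    (PySem.List.pyRange ((pvM arr k r : Nat) : Int) ((r : Int) + 1) 1).foldl (fun res j =>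
      PySem.Set.add res (pvJoin (PySem.List.slice arr (some j) (some ((r : Int) + 1))))) res
      = pvEmit arr k r res := by
  have hM := pvM_le arr k r
  rw [PySem.List.pyRange_one]
  rw [show (((r : Int) + 1) - ((pvM arr k r : Nat) : Int)).toNat = r + 1 - pvM arr k r by omega]
  rw [List.foldl_map]
  unfold pvEmit
  apply PySem.List.foldl_congr_mem
  intro acc d hd
  congr 1
  rw [show ((pvM arr k r : Nat) : Int) + (d : Nat) = (((pvM arr k r + d : Nat)) : Int) by push_cast; ring,
      show ((r : Int) + 1) = (((r + 1 : Nat)) : Int) by push_cast; ring,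
      PySem.List.slice_natCast, pvJoin_eq]
  rfl

theorem pvLoopB_spec (arr : List Int) (k : Int) (hk : ∀ x ∈ arr, pvW x ≤ k) :
    ∀ (tail : List Int) (r left : Nat) (res : PySem.Set String),
      arr.drop r = tail → r ≤ arr.length → left ≤ r →
      (r < arr.length → left ≤ pvM arr k r) →
      ∃ l o, (PySem.List.enumerate tail (r : Int)).foldl (fun st rx =>
          let right := rx.1
          let odd1 := st.2.1 + PySem.Int.mod rx.2 2
          let lo := pvShrinkB arr k right (right + 1 - st.1).toNat st.1 odd1
          let res' := (PySem.List.pyRange lo.1 (right + 1) 1).foldl (fun res j =>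
            PySem.Set.add res (pvJoin (PySem.List.slice arr (some j) (some (right + 1))))) st.2.2
          (lo.1, lo.2, res')) ((left : Int), pvP arr r - pvP arr left, res)
        = (l, o, (List.range' r (arr.length - r)).foldl (fun s r => pvEmit arr k r s) res) := by
  intro tail
  induction tail with
  | nil =>
    intro r left res hdrop h2 h3 h4
    have : arr.length ≤ r := by
      have := congrArg List.length hdrop
      simp at this
      omega
    rw [show arr.length - r = 0 by omega]
    exact ⟨(left : Int), pvP arr r - pvP arr left, by simp [PySem.List.enumerate_nil]⟩
  | cons x xs ih =>
    intro r left res hdrop h2 h3 h4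
    have hrn : r < arr.length := by
      by_contra h
      rw [List.drop_eq_nil_of_le (by omega)] at hdrop
      exact List.cons_ne_nil x xs hdrop.symm
    have hx : arr[r] = x := by
      have := List.drop_eq_getElem_cons hrn
      rw [hdrop] at this
      exact (List.cons.injEq _ _ _ _ ▸ this).1.symm
    rw [PySem.List.enumerate_cons, List.foldl_cons]
    simp only
    have hsucc := pvP_succ arr r hrn
    have hstep : pvP arr r - pvP arr left + PySem.Int.mod x 2 = pvP arr (r + 1) - pvP arr left := by
      rw [← hx]
      show _ + pvW arr[r] = _
      omega
    rw [hstep]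
    have hfuel : ((r : Int) + 1 - (left : Int)).toNat = r + 1 - left := by omega
    rw [hfuel]
    rw [pvShrinkB_spec arr k r hrn hk (r + 1 - left) left (h4 hrn)
      (by have := pvM_le arr k r; omega)]
    simp only
    rw [pvEmitB arr k r res]
    have hdrop' : arr.drop (r + 1) = xs := by
      have h2 := congrArg (List.drop 1) hdrop
      rw [List.drop_drop] at h2
      simpa using h2
    have hih := ih (r + 1) (pvM arr k r) (pvEmit arr k r res) hdrop' (by omega)
      (by have := pvM_le arr k r; omega)
      (fun _ => pvM_mono arr k (Nat.le_succ r))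
    rw [show ((r : Int) + 1) = (((r + 1 : Nat)) : Int) by push_cast; ring]
    rcases hih with ⟨l, o, hih⟩
    refine ⟨l, o, ?_⟩
    rw [hih]
    rw [show arr.length - r = (arr.length - (r + 1)) + 1 by omega, List.range'_succ, List.foldl_cons]

theorem pvB_canon (arr : List Int) (k : Int) (hk : ∀ x ∈ arr, pvW x ≤ k) :
    evenSubarray_alt arr k = pvCanon arr k := by
  unfold evenSubarray_alt pvCanon
  obtain ⟨l, o, h⟩ := pvLoopB_spec arr k hk arr 0 0 [] rfl (by omega) (by omega)
    (fun _ => Nat.zero_le _)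
  have h0 : pvP arr 0 - pvP arr 0 = 0 := by omega
  rw [h0] at h
  rw [show ((0 : Nat) : Int) = (0 : Int) by norm_num] at h
  conv_lhs => rw [show (PySem.Set.empty : PySem.Set String) = ([] : List String) from rfl]
  rw [h]
  simp [List.range_eq_range']

-- ===== VERDICT (by name: the statement is the Claim_ definition above) =====
theorem evenSubarray_spec : Claim_unchanged_evenSubarray := by
  intro arr k _
  unfold Spec_evenSubarray
  intro hD
  have hk : ∀ x ∈ arr, pvW x ≤ k := by
    intro x hx
    by_contra h
    exact hD ⟨x, hx, by unfold pvW at h; omega⟩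
  rw [pvA_canon, pvB_canon arr k hk]

theorem evenSubarray_changed : Claim_changed_evenSubarray := by
  unfold Claim_changed_evenSubarray; decide
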